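-- pv_equiv track=rewrite | github.com/sharathpend/Falcon-Arm | neon-fpu-512/test/table_generate_1024.py | center_q
-- ===== SOURCE A (Python) =====
-- FALCON_Q = 12289
--
-- def center_q(a):
--     b = []
--     for i in a:
--         i = i % FALCON_Q
--         if i > FALCON_Q // 2:
--             t = i - FALCON_Q
--         elif i < -FALCON_Q // 2:
--             t = i + FALCON_Q
--         else:
--             t = i
--         b.append(t)
--     return b
-- ===== SOURCE B (Python) =====
-- FALCON_Q = 12289
--
-- def center_q(a):
--     # lookup table: table[r] is the centered representative of residue r,
--     # built branch-free as two consecutive ranges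
--     table = list(range(FALCON_Q // 2 + 1)) + list(range(-(FALCON_Q // 2), 0))
--     return [table[i % FALCON_Q] for i in a]
-- ===== Notes on version B (the rewrite author's own statement) =====
-- stated objective: alternative
-- what changed: Replaces per-element branching by a precomputed 12289-entry lookup table of centered residues, built branch-free as the concatenation of the ranges 0..Q//2 and -(Q//2)..-1, so each output element is just table[i % Q].
import Mathlib
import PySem

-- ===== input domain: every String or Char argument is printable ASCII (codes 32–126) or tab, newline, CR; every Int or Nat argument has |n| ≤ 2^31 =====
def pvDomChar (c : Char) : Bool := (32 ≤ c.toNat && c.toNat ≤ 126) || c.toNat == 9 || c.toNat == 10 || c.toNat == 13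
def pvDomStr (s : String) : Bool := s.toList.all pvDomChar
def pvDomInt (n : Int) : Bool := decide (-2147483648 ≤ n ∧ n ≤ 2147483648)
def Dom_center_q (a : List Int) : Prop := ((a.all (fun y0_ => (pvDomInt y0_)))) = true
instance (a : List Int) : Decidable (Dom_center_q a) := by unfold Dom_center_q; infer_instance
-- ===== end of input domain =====

-- B replaces A's per-element three-way branch by a precomputed lookup table of
-- all centered residues, built branch-free as two concatenated ranges; objective: alternative.

def FALCON_Q : Int := 12289

-- ===== PORT A =====
-- literal transliteration: loop over a, reduce mod Q, three-way branch, append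
def center_q (a : List Int) : List Int :=
  a.foldl (fun b i =>
    let i' := PySem.Int.mod i FALCON_Q
    let t : Int :=
      if i' > PySem.Int.floordiv FALCON_Q 2 then i' - FALCON_Q
      else if i' < PySem.Int.floordiv (-FALCON_Q) 2 then i' + FALCON_Q
      else i'
    b ++ [t]) []

-- ===== PORT B =====
-- literal transliteration of Source B: table = two concatenated ranges, then index by i % Q.
-- The index i % Q is always in range 0..Q-1, so pyGet? never returns none; the
-- '.getD 0' only discharges the Option and is never the value returned.
def center_q_alt (a : List Int) : List Int :=
  let table := PySem.List.pyRange 0 (PySem.Int.floordiv FALCON_Q 2 + 1) 1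
            ++ PySem.List.pyRange (-(PySem.Int.floordiv FALCON_Q 2)) 0 1
  a.map (fun i => (PySem.List.pyGet? table (PySem.Int.mod i FALCON_Q)).getD 0)

-- ===== PRECONDITION & SPEC =====
def Spec_center_q (a : List Int) (out : List Int) : Prop := out = center_q_alt a
instance (a : List Int) (out : List Int) : Decidable (Spec_center_q a out) := by unfold Spec_center_q; infer_instance

-- ===== CLAIM (what is proved, stated in full; the proofs are below) =====
def Claim_equal_center_q : Prop := ∀ (a : List Int), Dom_center_q a → Spec_center_q a (center_q a)

-- ===== LEMMAS AND PROOFS =====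

-- the table lookup at a residue r ∈ [0, Q) yields exactly A's branch value
theorem table_lookup (r : Int) (h0 : 0 ≤ r) (h1 : r < 12289) :
    (PySem.List.pyGet?
      (PySem.List.pyRange 0 6145 1 ++ PySem.List.pyRange (-6144) 0 1) r).getD 0
    = if r > 6144 then r - 12289 else r := by
  have hlen : (PySem.List.pyRange 0 6145 1 ++ PySem.List.pyRange (-6144) 0 1).length = 12289 := by
    simp [PySem.List.length_pyRange_one]
  rw [PySem.List.pyGet?_eq_some_getElem _ h0 (by rw [hlen]; omega)]
  by_cases hc : r > 6144
  · have hlt : ¬ r.toNat < (PySem.List.pyRange 0 6145 1).length := by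
      simp [PySem.List.length_pyRange_one]; omega
    rw [List.getElem_append_right (by omega)]
    simp only [PySem.List.length_pyRange_one, PySem.List.getElem_pyRange_one]
    simp only [Option.getD_some]
    omega
  · rw [List.getElem_append_left (by simp [PySem.List.length_pyRange_one]; omega)]
    simp only [PySem.List.getElem_pyRange_one, Option.getD_some]
    simp [hc]
    omega

-- fold-append as map (A's loop shape)
theorem foldl_append_map {α β : Type} (f : α → β) (a : List α) (acc : List β) :
    a.foldl (fun b i => b ++ [f i]) acc = acc ++ a.map f := by
  induction a generalizing acc with
  | nil => simp
  | cons x xs ih => simp [ih]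

-- elementwise agreement: branch selection equals the table entry at i % Q
theorem center_q_elem (i : Int) :
    (let i' := PySem.Int.mod i FALCON_Q
     if i' > PySem.Int.floordiv FALCON_Q 2 then i' - FALCON_Q
     else if i' < PySem.Int.floordiv (-FALCON_Q) 2 then i' + FALCON_Q
     else i')
    = (PySem.List.pyGet?
        (PySem.List.pyRange 0 (PySem.Int.floordiv FALCON_Q 2 + 1) 1
          ++ PySem.List.pyRange (-(PySem.Int.floordiv FALCON_Q 2)) 0 1)
        (PySem.Int.mod i FALCON_Q)).getD 0 := by
  have hq : (0:Int) < FALCON_Q := by decide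
  rw [show PySem.Int.floordiv FALCON_Q 2 = 6144 from by decide,
      show PySem.Int.floordiv (-FALCON_Q) 2 = -6145 from by decide]
  rw [PySem.Int.mod_eq_emod_of_pos hq]
  simp only [FALCON_Q]
  have hb1 : 0 ≤ i % 12289 := Int.emod_nonneg i (by decide)
  have hb2 : i % 12289 < 12289 := Int.emod_lt_of_pos i (by decide)
  rw [show (6144 : Int) + 1 = 6145 from rfl, table_lookup (i % 12289) hb1 hb2]
  split_ifs <;> omega

-- ===== VERDICT (by name: the statement is the Claim_ definition above) =====
theorem center_q_spec : Claim_equal_center_q := by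
  intro a _
  unfold Spec_center_q center_q center_q_alt
  rw [foldl_append_map (fun i =>
      let i' := PySem.Int.mod i FALCON_Q
      if i' > PySem.Int.floordiv FALCON_Q 2 then i' - FALCON_Q
      else if i' < PySem.Int.floordiv (-FALCON_Q) 2 then i' + FALCON_Q
      else i') a []]
  simp only [List.nil_append]
  exact List.map_congr_left fun i _ => center_q_elem i
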